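-- pv_equiv track=rewrite | github.com/Danto7632/ia-codyssey | essential_step_1/essential_procedure_2/problem_2/ caesar_cipher_decode.py | check_dictionary
-- ===== SOURCE A (Python) =====
-- WORD_LIST = [
--     'mars',
--     'base',
--     'door',
--     'open',
--     'oxygen',
--     'water',
--     'emergency',
--     'storage',
--     'password',
--     'key',
--     'unlock'
-- ]
--
-- def check_dictionary(text):
--     lower_text = text.lower()
--     clean_text = ''
--
--     for char in lower_text:
--         if 'a' <= char <= 'z':
--             clean_text += char
--         else:
--             clean_text += ' '
--
--     text_words = clean_text.split()
--
--     for word in WORD_LIST: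
--         if word in text_words:
--             return word
--
--     return ''
-- ===== SOURCE B (Python) =====
-- WORD_LIST = [
--     'mars',
--     'base',
--     'door',
--     'open',
--     'oxygen',
--     'water',
--     'emergency',
--     'storage',
--     'password',
--     'key',
--     'unlock'
-- ]
--
-- WORD_RANK = {w: i for i, w in enumerate(WORD_LIST)}
--
-- def check_dictionary(text):
--     cleaned = ''.join(c if 'a' <= c <= 'z' else ' ' for c in text.lower())
--     n = len(WORD_LIST)
--     best = n
--     for w in cleaned.split():
--         r = WORD_RANK.get(w, n)
--         if r < best:
--             best = r
--     return WORD_LIST[best] if best < n else ''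
-- ===== Notes on version B (the rewrite author's own statement) =====
-- stated objective: alternative
-- what changed: B builds a word-to-rank dict once and drives a single loop over the text's words keeping the minimum dictionary rank, instead of A's loop over WORD_LIST with a full membership scan of the text's words per dictionary word and an early return.
import Mathlib
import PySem

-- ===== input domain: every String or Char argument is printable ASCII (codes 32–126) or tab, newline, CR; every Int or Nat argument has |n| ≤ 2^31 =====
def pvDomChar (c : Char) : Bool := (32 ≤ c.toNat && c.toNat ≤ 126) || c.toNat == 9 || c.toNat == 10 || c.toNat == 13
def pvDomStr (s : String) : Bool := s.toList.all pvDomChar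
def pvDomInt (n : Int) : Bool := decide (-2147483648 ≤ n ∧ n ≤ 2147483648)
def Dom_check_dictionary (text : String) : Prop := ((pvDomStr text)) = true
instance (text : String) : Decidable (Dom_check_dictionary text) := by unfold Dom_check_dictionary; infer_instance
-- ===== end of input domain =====

-- B looks up each text word's rank in a precomputed dict and keeps the minimum rank (one pass over the
-- text's words), instead of A's loop over the dictionary with a membership scan per word; same results.

-- ===== PORT A =====
-- WORD_LIST (strings kept as List Char, per the PySem string convention)
def pvWordList : List (List Char) :=
  [['m','a','r','s'], ['b','a','s','e'], ['d','o','o','r'], ['o','p','e','n'],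
   ['o','x','y','g','e','n'], ['w','a','t','e','r'],
   ['e','m','e','r','g','e','n','c','y'], ['s','t','o','r','a','g','e'],
   ['p','a','s','s','w','o','r','d'], ['k','e','y'], ['u','n','l','o','c','k']]

-- A's 'for word in WORD_LIST: if word in text_words: return word' / 'return '''
def pvLoopA : List (List Char) → List (List Char) → List Char
  | [], _ => []
  | w :: rest, ws => if w ∈ ws then w else pvLoopA rest ws

def check_dictionary (text : String) : String :=
  let lower_text := (PySem.Str.lower text).toList
  let clean_text := lower_text.foldl
    (fun acc c => if 'a' ≤ c ∧ c ≤ 'z' then acc ++ [c] else acc ++ [' ']) []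
  let text_words := PySem.Chars.split₀ clean_text
  String.ofList (pvLoopA pvWordList text_words)

-- ===== PORT B =====
-- WORD_RANK = {w: i for i, w in enumerate(WORD_LIST)}
def pvRank : PySem.Dict (List Char) Int :=
  (PySem.List.enumerate pvWordList).foldl (fun d p => d.insert p.2 p.1) PySem.Dict.empty

def check_dictionary_alt (text : String) : String :=
  let cleaned := (PySem.Str.lower text).toList.map
    (fun c => if 'a' ≤ c ∧ c ≤ 'z' then c else ' ')
  let n : Int := (pvWordList.length : Int)
  let best := (PySem.Chars.split₀ cleaned).foldl
    (fun b w => let r := pvRank.getD w n; if r < b then r else b) n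
  if best < n then String.ofList ((PySem.List.pyGet? pvWordList best).getD []) else ""

-- ===== PRECONDITION & SPEC =====
def Spec_check_dictionary (text : String) (out : String) : Prop := out = check_dictionary_alt text
instance (text : String) (out : String) : Decidable (Spec_check_dictionary text out) := by unfold Spec_check_dictionary; infer_instance

-- ===== CLAIM (what is proved, stated in full; the proofs are below) =====
def Claim_equal_check_dictionary : Prop := ∀ (text : String), Dom_check_dictionary text → Spec_check_dictionary text (check_dictionary text)

-- ===== LEMMAS AND PROOFS =====

-- A's character loop builds exactly the mapped list B builds.
theorem pv_clean_eq (l : List Char) (acc : List Char) :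
    l.foldl (fun acc c => if 'a' ≤ c ∧ c ≤ 'z' then acc ++ [c] else acc ++ [' ']) acc
      = acc ++ l.map (fun c => if 'a' ≤ c ∧ c ≤ 'z' then c else ' ') := by
  induction l generalizing acc with
  | nil => simp
  | cons c l ih => by_cases h : 'a' ≤ c ∧ c ≤ 'z' <;> simp [h, ih]

def pvStep (b : Int) (w : List Char) : Int :=
  let r := pvRank.getD w (pvWordList.length : Int); if r < b then r else b

def pvRankD (w : List Char) : Int := pvRank.getD w (pvWordList.length : Int)

theorem pvStep_eq (b : Int) (w : List Char) :
    pvStep b w = if pvRankD w < b then pvRankD w else b := rfl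

theorem pv_fold_le (ws : List (List Char)) (b : Int) : ws.foldl pvStep b ≤ b := by
  induction ws generalizing b with
  | nil => simp
  | cons w ws ih =>
    have h1 : pvStep b w ≤ b := by
      simp only [pvStep]; split <;> omega
    calc (w :: ws).foldl pvStep b = ws.foldl pvStep (pvStep b w) := rfl
    _ ≤ pvStep b w := ih _
    _ ≤ b := h1

theorem pv_fold_le_rank (ws : List (List Char)) (b : Int) (w : List Char) (hw : w ∈ ws) :
    ws.foldl pvStep b ≤ pvRankD w := by
  induction ws generalizing b with
  | nil => simp at hw
  | cons x ws ih =>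
    rcases List.mem_cons.mp hw with rfl | hw
    · calc (w :: ws).foldl pvStep b = ws.foldl pvStep (pvStep b w) := rfl
      _ ≤ pvStep b w := pv_fold_le _ _
      _ ≤ pvRankD w := by simp only [pvStep, pvRankD]; split <;> omega
    · exact ih _ hw

theorem pv_fold_eq (ws : List (List Char)) (b : Int) :
    ws.foldl pvStep b = b ∨ ∃ w ∈ ws, ws.foldl pvStep b = pvRankD w := by
  induction ws generalizing b with
  | nil => left; rfl
  | cons x ws ih =>
    rw [List.foldl_cons]
    rcases ih (pvStep b x) with h | ⟨w, hw, h⟩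
    · rw [h, pvStep_eq]
      split
      · exact Or.inr ⟨x, by simp, rfl⟩
      · exact Or.inl rfl
    · exact Or.inr ⟨w, List.mem_cons_of_mem _ hw, h⟩

-- rank facts about the literal dictionary
theorem pv_rank_mem : ∀ w ∈ pvWordList,
    0 ≤ pvRankD w ∧ pvRankD w < 11 ∧ PySem.List.pyGet? pvWordList (pvRankD w) = some w := by
  decide

theorem pv_rank_idx : ∀ i : Nat, i < 11 → pvRankD (pvWordList.getD i []) = (i : Int) := by
  decide

theorem pv_rank_not_mem (w : List Char) (hw : w ∉ pvWordList) : pvRankD w = 11 := by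
  have hk : pvRank.keys = pvWordList := by decide
  have hc : pvRank.contains w = false := by
    rw [← Bool.not_eq_true, PySem.Dict.contains_iff_mem_keys, hk]
    exact hw
  have h := PySem.Dict.getD_of_not_contains (d := pvRank) (k := w)
    (d0 := (pvWordList.length : Int)) hc
  rw [pvRankD, h]
  decide

theorem pv_loopA_none (dl ws : List (List Char)) (h : ∀ d ∈ dl, d ∉ ws) :
    pvLoopA dl ws = [] := by
  induction dl with
  | nil => rfl
  | cons d dl ih =>
    have hd : d ∉ ws := h d (by simp)
    simp only [pvLoopA]
    rw [if_neg hd]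
    exact ih fun x hx => h x (by simp [hx])

theorem pv_loopA_of (dl ws : List (List Char)) (k : Nat) (hk : k < dl.length)
    (h2 : dl.getD k [] ∈ ws) (h3 : ∀ i : Nat, i < k → dl.getD i [] ∉ ws) :
    pvLoopA dl ws = dl.getD k [] := by
  induction dl generalizing k with
  | nil => simp at hk
  | cons d dl ih =>
    cases k with
    | zero =>
      have hd : d ∈ ws := by simpa using h2
      simp [pvLoopA, hd]
    | succ k =>
      simp only [pvLoopA]
      rw [if_neg (by simpa using h3 0 (Nat.succ_pos k))]
      exact ih k (by simpa using hk) (by simpa using h2)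
        (fun i hi => by simpa using h3 (i+1) (by omega))

-- main equivalence
theorem pv_main (text : String) : check_dictionary text = check_dictionary_alt text := by
  simp only [check_dictionary, check_dictionary_alt]
  rw [pv_clean_eq]
  simp only [List.nil_append]
  have hstep : (fun b w => let r := pvRank.getD w (pvWordList.length : Int);
      if r < b then r else b) = pvStep := rfl
  rw [hstep]
  have hlen : (pvWordList.length : Int) = 11 := by decide
  rw [hlen]
  set ws := PySem.Chars.split₀
    ((PySem.Str.lower text).toList.map fun c => if 'a' ≤ c ∧ c ≤ 'z' then c else ' ') with hws
  set m := ws.foldl pvStep 11 with hm'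
  by_cases hm : m < 11
  · rw [if_pos hm]
    rcases pv_fold_eq ws 11 with h | ⟨w, hw, h⟩
    · rw [← hm'] at h; omega
    · rw [← hm'] at h
      by_cases hmem : w ∈ pvWordList
      · obtain ⟨h0, h11, hget⟩ := pv_rank_mem w hmem
        have hm0 : 0 ≤ m := h ▸ h0
        have hmk : ((m.toNat : Nat) : Int) = m := Int.toNat_of_nonneg hm0
        have hk11 : m.toNat < 11 := by omega
        have hget' : PySem.List.pyGet? pvWordList m = some w := h ▸ hget
        have hget2 : pvWordList[m.toNat]? = some w := by
          rw [← hmk, PySem.List.pyGet?_natCast] at hget'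
          exact hget'
        have hkd : pvWordList.getD m.toNat [] = w := by
          simp [List.getD, hget2]
        have h3 : ∀ i : Nat, i < m.toNat → pvWordList.getD i [] ∉ ws := by
          intro i hi hin
          have hle := pv_fold_le_rank ws 11 _ hin
          rw [← hm'] at hle
          rw [pv_rank_idx i (by omega)] at hle
          omega
        have hlen2 : pvWordList.length = 11 := by decide
        have hl := pv_loopA_of pvWordList ws m.toNat (by omega)
          (by rw [hkd]; exact hw) h3
        rw [hl, hkd, hget']
        rfl
      · rw [pv_rank_not_mem w hmem] at h
        omega
  · rw [if_neg hm]
    have hnone : ∀ d ∈ pvWordList, d ∉ ws := by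
      intro d hd hdin
      obtain ⟨h0, h11, _⟩ := pv_rank_mem d hd
      have hle := pv_fold_le_rank ws 11 d hdin
      rw [← hm'] at hle
      omega
    rw [pv_loopA_none _ _ hnone]

-- ===== VERDICT (by name: the statement is the Claim_ definition above) =====
theorem check_dictionary_spec : Claim_equal_check_dictionary := by
  intro text _
  exact pv_main text
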